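-- pv_equiv track=rewrite | github.com/parc-nsi/premiere | docs/chapitre22/ressources/knn.py | element_majoritaire
-- ===== SOURCE A (Python) =====
-- def element_majoritaire(k_voisins):
--     """
--     Parameters
--     ----------
--     k_voisins : tableau des k plus proches voisins
--     Returns
--     -------
--     voisin_majoritaire : chaine de caractère type str, étiquette majoritaire
--     parmi les voisins
--     """
--     occurence = dict()
--     voisin_majoritaire = k_voisins[0]
--     for voisin in k_voisins:
--         if voisin not in occurence:
--             occurence[voisin] = 1
--         else:
--             occurence[voisin] = occurence[voisin] + 1
--         if voisin != voisin_majoritaire and occurence[voisin] > occurence[voisin_majoritaire]: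
--             voisin_majoritaire = voisin
--     return voisin_majoritaire
-- ===== SOURCE B (Python) =====
-- def element_majoritaire(k_voisins):
--     """Count-then-rescan: build all occurrence counts, take the maximum M,
--     then return the first voisin whose running count reaches M (same
--     tie-breaking as the single-pass leader scan)."""
--     fallback = k_voisins[0]
--     occurence = dict()
--     for voisin in k_voisins:
--         occurence[voisin] = occurence.get(voisin, 0) + 1
--     M = max(occurence.values())
--     running = dict()
--     for voisin in k_voisins:
--         running[voisin] = running.get(voisin, 0) + 1
--         if running[voisin] == M:
--             return voisin
--     return fallback
-- ===== Notes on version B (the rewrite author's own statement) =====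
-- stated objective: alternative
-- what changed: Replaces the single-pass running-leader update with a count-then-rescan decomposition: one pass builds the full occurrence dict and its maximum M, a second pass returns the first label whose running count reaches M, which reproduces A's exact tie-breaking.
import Mathlib
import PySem

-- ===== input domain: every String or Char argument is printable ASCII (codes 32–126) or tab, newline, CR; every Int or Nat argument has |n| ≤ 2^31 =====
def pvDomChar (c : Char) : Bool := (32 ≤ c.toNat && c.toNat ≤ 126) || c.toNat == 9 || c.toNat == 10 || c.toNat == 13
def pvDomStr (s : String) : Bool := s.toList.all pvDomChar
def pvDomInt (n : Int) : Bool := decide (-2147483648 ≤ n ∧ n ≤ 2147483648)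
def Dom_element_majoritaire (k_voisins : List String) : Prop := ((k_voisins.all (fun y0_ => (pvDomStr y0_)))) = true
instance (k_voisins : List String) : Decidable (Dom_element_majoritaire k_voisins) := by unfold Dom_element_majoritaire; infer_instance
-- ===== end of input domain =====

-- B replaces A's single-pass running-leader with a count-then-rescan decomposition (same values, same tie-breaking); objective: alternative.

-- ===== PORT A =====
-- A: running-leader fold over a (dict, leader) state.
def element_majoritaire (k_voisins : List String) : String :=
  (k_voisins.foldl
    (fun (st : PySem.Dict String Int × String) voisin =>
      let occurence :=
        if st.1.contains voisin = false then st.1.insert voisin 1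
        else st.1.insert voisin (st.1.getD voisin 0 + 1)
      let maj :=
        if voisin ≠ st.2 ∧ occurence.getD voisin 0 > occurence.getD st.2 0
        then voisin else st.2
      (occurence, maj))
    (PySem.Dict.empty, (PySem.List.pyGet? k_voisins 0).getD "")).2

-- ===== PORT B =====
-- B-side helper: the second loop with early return ('return fallback' is the fall-off case).
def emRescan (M : Int) : List String → PySem.Dict String Int → String → String
  | [], _, fallback => fallback
  | voisin :: rest, running, fallback =>
    let running := running.insert voisin (running.getD voisin 0 + 1)
    if running.getD voisin 0 = M then voisin else emRescan M rest running fallback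

def element_majoritaire_alt (k_voisins : List String) : String :=
  let fallback := (PySem.List.pyGet? k_voisins 0).getD ""
  let occurence := k_voisins.foldl (fun d v => d.insert v (d.getD v 0 + 1)) PySem.Dict.empty
  let M := (PySem.List.max? occurence.values (fun x => x)).getD 0
  emRescan M k_voisins PySem.Dict.empty fallback

-- ===== PRECONDITION & SPEC =====
-- Pre_ excludes only the empty list, on which both A and B raise IndexError at k_voisins[0].
def Pre_element_majoritaire (k_voisins : List String) : Prop := k_voisins ≠ []
instance (k_voisins : List String) : Decidable (Pre_element_majoritaire k_voisins) := by unfold Pre_element_majoritaire; infer_instance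
def pvWitness_element_majoritaire : List String := ["a", "b", "a"]
def Spec_element_majoritaire (k_voisins : List String) (out : String) : Prop := out = element_majoritaire_alt k_voisins
instance (k_voisins : List String) (out : String) : Decidable (Spec_element_majoritaire k_voisins out) := by unfold Spec_element_majoritaire; infer_instance

-- ===== CLAIM (what is proved, stated in full; the proofs are below) =====
def Claim_equal_element_majoritaire : Prop := ∀ (k_voisins : List String), Dom_element_majoritaire k_voisins → Pre_element_majoritaire k_voisins → Spec_element_majoritaire k_voisins (element_majoritaire k_voisins)

-- ===== LEMMAS AND PROOFS =====

-- Abstract version of A's leader update (counts over the processed prefix p).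
def leadAbs : List String → List String → String → String
  | _, [], L => L
  | p, v :: rest, L =>
    leadAbs (p ++ [v]) rest
      (if v ≠ L ∧ (p ++ [v]).count v > (p ++ [v]).count L then v else L)

-- Abstract version of B's rescan: first element whose running count reaches M.
def firstToReach (M : Nat) : List String → List String → Option String
  | _, [] => none
  | p, v :: rest => if (p ++ [v]).count v = M then some v else firstToReach M (p ++ [v]) rest


theorem countAppendSingleton (p : List String) (v u : String) :
    (p ++ [v]).count u = p.count u + (if v = u then 1 else 0) := by
  rw [List.count_append, List.count_singleton']

theorem firstToReach_append_some (M : Nat) (q xs : List String) (v x : String)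
    (h : firstToReach M q xs = some x) : firstToReach M q (xs ++ [v]) = some x := by
  induction xs generalizing q with
  | nil => simp [firstToReach] at h
  | cons y t ih =>
      simp only [List.cons_append, firstToReach] at h ⊢
      by_cases hc : (q ++ [y]).count y = M
      · rw [if_pos hc] at h ⊢; exact h
      · rw [if_neg hc] at h ⊢; exact ih _ h

theorem firstToReach_append_none (M : Nat) (q xs : List String) (v : String)
    (h : firstToReach M q xs = none) :
    firstToReach M q (xs ++ [v]) =
      if ((q ++ xs) ++ [v]).count v = M then some v else none := by
  induction xs generalizing q with
  | nil => simp [firstToReach]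
  | cons y t ih =>
      simp only [List.cons_append, firstToReach] at h ⊢
      by_cases hc : (q ++ [y]).count y = M
      · rw [if_pos hc] at h; cases h
      · rw [if_neg hc] at h ⊢
        rw [ih _ h]
        simp [List.append_assoc]

theorem firstToReach_none (M : Nat) (q xs : List String)
    (h : ∀ u ∈ xs, (q ++ xs).count u < M) : firstToReach M q xs = none := by
  induction xs generalizing q with
  | nil => rfl
  | cons v t ih =>
      have hv : (q ++ [v]).count v ≤ (q ++ v :: t).count v := by
        simp only [List.count_append]
        have : List.count v [v] ≤ List.count v (v :: t) := by simp
        omega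
      have hne : (q ++ [v]).count v ≠ M := by
        have := h v (by simp); omega
      simp only [firstToReach, if_neg hne]
      apply ih
      intro u hu
      have := h u (by simp [hu])
      simpa [List.append_assoc] using this

-- The invariant A's loop maintains: the leader is in the prefix, has maximal
-- count there, and is the first element to reach that count.
def emInv (p : List String) (L : String) : Prop :=
  L ∈ p ∧ (∀ u ∈ p, p.count u ≤ p.count L) ∧ firstToReach (p.count L) [] p = some L

theorem emInv_step (p : List String) (L v : String) (h : emInv p L) :
    emInv (p ++ [v])
      (if v ≠ L ∧ (p ++ [v]).count v > (p ++ [v]).count L then v else L) := by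
  obtain ⟨hmem, hub, hfirst⟩ := h
  by_cases hc : p.count v + 1 ≤ p.count L
  · -- no new maximum: leader stays L
    have hvL : v ≠ L := by
      intro hEq; subst hEq; omega
    have hcL : (p ++ [v]).count L = p.count L := by
      rw [countAppendSingleton, if_neg hvL]; omega
    have hcv : (p ++ [v]).count v = p.count v + 1 := by
      rw [countAppendSingleton, if_pos rfl]
    have hcond : ¬ (v ≠ L ∧ (p ++ [v]).count v > (p ++ [v]).count L) := by
      rw [hcL, hcv]; omega
    rw [if_neg hcond]
    refine ⟨by simp [hmem], ?_, ?_⟩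
    · intro u hu
      rw [hcL, countAppendSingleton]
      by_cases hvu : v = u
      · rw [if_pos hvu]; subst hvu; omega
      · rw [if_neg hvu]
        have hup : u ∈ p := by
          rcases List.mem_append.1 hu with hx | hx
          · exact hx
          · exact absurd ((by simpa using hx : u = v)).symm hvu
        have := hub u hup; omega
    · rw [hcL]
      exact firstToReach_append_some _ _ _ _ _ hfirst
  · -- v attains a strictly larger count: leader becomes v
    have hvp : v ∈ p := by
      by_contra hnp
      have h0 : p.count v = 0 := List.count_eq_zero.2 hnp
      have h1 : 0 < p.count L := List.count_pos_iff.2 hmem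
      omega
    have hcv0 : p.count v = p.count L := by
      have := hub v hvp; omega
    have hcv : (p ++ [v]).count v = p.count L + 1 := by
      rw [countAppendSingleton, if_pos rfl]; omega
    have hres :
        (if v ≠ L ∧ (p ++ [v]).count v > (p ++ [v]).count L then v else L) = v := by
      by_cases hvL : v = L
      · rw [if_neg (by simp [hvL])]; exact hvL.symm
      · rw [if_pos ⟨hvL, by rw [hcv, countAppendSingleton, if_neg hvL]; omega⟩]
    rw [hres]
    refine ⟨by simp, ?_, ?_⟩
    · intro u hu
      rw [hcv, countAppendSingleton]
      by_cases hvu : v = u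
      · rw [if_pos hvu]; subst hvu; omega
      · rw [if_neg hvu]
        have hup : u ∈ p := by
          rcases List.mem_append.1 hu with hx | hx
          · exact hx
          · exact absurd ((by simpa using hx : u = v)).symm hvu
        have := hub u hup; omega
    · have hnone : firstToReach (p.count L + 1) [] p = none := by
        apply firstToReach_none
        intro u hu
        simp only [List.nil_append]
        exact Nat.lt_succ_of_le (hub u hu)
      rw [hcv, firstToReach_append_none _ _ _ _ hnone]
      simp only [List.nil_append]
      rw [if_pos hcv]

theorem leadAbs_inv (rest : List String) :
    ∀ (p : List String) (L : String), emInv p L → emInv (p ++ rest) (leadAbs p rest L) := by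
  induction rest with
  | nil => intro p L h; simpa [leadAbs] using h
  | cons v t ih =>
      intro p L h
      have := ih (p ++ [v]) _ (emInv_step p L v h)
      simpa [leadAbs, List.append_assoc] using this

theorem foldA_eq (rest : List String) :
    ∀ (q : List String) (d : PySem.Dict String Int) (L : String),
      (∀ u, d.getD u 0 = (q.count u : Int)) →
      (rest.foldl
        (fun (st : PySem.Dict String Int × String) voisin =>
          let occurence :=
            if st.1.contains voisin = false then st.1.insert voisin 1
            else st.1.insert voisin (st.1.getD voisin 0 + 1)
          let maj :=
            if voisin ≠ st.2 ∧ occurence.getD voisin 0 > occurence.getD st.2 0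
            then voisin else st.2
          (occurence, maj)) (d, L)).2 = leadAbs q rest L := by
  induction rest with
  | nil => intro q d L _; rfl
  | cons v t ih =>
      intro q d L hd
      have hins : ∀ u,
          (d.insert v (d.getD v 0 + 1)).getD u 0 = (((q ++ [v]).count u : Nat) : Int) := by
        intro u
        rw [PySem.Dict.getD_insert, countAppendSingleton]
        by_cases huv : u = v
        · subst huv
          rw [if_pos rfl, if_pos rfl, hd u]
          push_cast; omega
        · rw [if_neg huv, if_neg (fun e => huv e.symm), hd u]
          push_cast; omega
      have hd' : ∀ u,
          (if d.contains v = false then d.insert v 1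
           else d.insert v (d.getD v 0 + 1)).getD u 0 = (((q ++ [v]).count u : Nat) : Int) := by
        intro u
        by_cases hcon : d.contains v = false
        · have h0 : d.getD v 0 = 0 := PySem.Dict.getD_of_not_contains d 0 hcon
          rw [if_pos hcon,
            show d.insert v 1 = d.insert v (d.getD v 0 + 1) from by rw [h0, zero_add]]
          exact hins u
        · rw [if_neg hcon]; exact hins u
      have hcond :
          (v ≠ L ∧
            (if d.contains v = false then d.insert v 1
             else d.insert v (d.getD v 0 + 1)).getD v 0 >
            (if d.contains v = false then d.insert v 1
             else d.insert v (d.getD v 0 + 1)).getD L 0) ↔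
          (v ≠ L ∧ (q ++ [v]).count v > (q ++ [v]).count L) := by
        rw [hd' v, hd' L]
        exact and_congr_right (fun _ => by exact_mod_cast Iff.rfl)
      simp only [List.foldl_cons, leadAbs]
      rw [ih (q ++ [v]) _ _ hd']
      congr 1
      rw [if_congr hcond rfl rfl]

theorem emRescan_eq (M : Nat) (rest : List String) :
    ∀ (q : List String) (d : PySem.Dict String Int) (fb : String),
      (∀ u, d.getD u 0 = (q.count u : Int)) →
      emRescan (M : Int) rest d fb = (firstToReach M q rest).getD fb := by
  induction rest with
  | nil => intro q d fb _; rfl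
  | cons v t ih =>
      intro q d fb hd
      have hd' : ∀ u,
          (d.insert v (d.getD v 0 + 1)).getD u 0 = (((q ++ [v]).count u : Nat) : Int) := by
        intro u
        rw [PySem.Dict.getD_insert, countAppendSingleton]
        by_cases huv : u = v
        · subst huv
          rw [if_pos rfl, if_pos rfl, hd u]
          push_cast; omega
        · rw [if_neg huv, if_neg (fun e => huv e.symm), hd u]
          push_cast; omega
      simp only [emRescan, firstToReach]
      rw [hd' v]
      by_cases hM : (q ++ [v]).count v = M
      · rw [if_pos (by exact_mod_cast hM), if_pos hM]; rfl
      · rw [if_neg (by exact_mod_cast hM), if_neg hM]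
        exact ih (q ++ [v]) _ fb hd'

theorem max_values_eq (l : List String) (L : String) (hL : L ∈ l)
    (hub : ∀ u ∈ l, l.count u ≤ l.count L) :
    PySem.List.max? ((PySem.Set.ofList l).map (fun k => (l.count k : Int))) (fun x => x) =
      some ((l.count L : Int)) := by
  have hLs : L ∈ PySem.Set.ofList l := (PySem.Set.mem_ofList l L).2 hL
  have hvne : (PySem.Set.ofList l).map (fun k => (l.count k : Int)) ≠ [] := by
    intro hnil
    exact absurd (List.map_eq_nil_iff.1 hnil ▸ hLs) List.not_mem_nil
  obtain ⟨m, hm⟩ : ∃ m,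
      PySem.List.max? ((PySem.Set.ofList l).map (fun k => (l.count k : Int))) (fun x => x) =
        some m := by
    cases hmax : PySem.List.max? ((PySem.Set.ofList l).map (fun k => (l.count k : Int)))
        (fun x => x) with
    | none => exact absurd ((PySem.List.max?_eq_none_iff _ _).1 hmax) hvne
    | some m => exact ⟨m, rfl⟩
  have hmem := PySem.List.max?_mem hm
  obtain ⟨u, hu, humap⟩ := List.mem_map.1 hmem
  have hule : m ≤ (l.count L : Int) := by
    rw [← humap]
    exact_mod_cast hub u ((PySem.Set.mem_ofList l u).1 hu)
  have hge : (l.count L : Int) ≤ m :=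
    PySem.List.max?_isMax hm _ (List.mem_map.2 ⟨L, hLs, rfl⟩)
  rw [hm, le_antisymm hule hge]

-- ===== VERDICT (by name: the statement is the Claim_ definition above) =====
theorem element_majoritaire_spec : Claim_equal_element_majoritaire := by
  intro l _ hpre
  obtain ⟨v0, rest, rfl⟩ : ∃ v0 rest, l = v0 :: rest := by
    cases l with
    | nil => exact absurd rfl hpre
    | cons a t => exact ⟨a, t, rfl⟩
  have hfb : (PySem.List.pyGet? (v0 :: rest) 0).getD "" = v0 := by
    simp [PySem.List.pyGet?, PySem.List.pyIdx?]
  have hempty : ∀ u : String, (PySem.Dict.empty : PySem.Dict String Int).getD u 0 =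
      (List.count u ([] : List String) : Int) := by
    intro u; simp
  -- A's value
  have hA : element_majoritaire (v0 :: rest) = leadAbs [] (v0 :: rest) v0 := by
    unfold element_majoritaire
    rw [hfb]
    exact foldA_eq (v0 :: rest) [] PySem.Dict.empty v0 hempty
  have hstep1 : leadAbs [] (v0 :: rest) v0 = leadAbs [v0] rest v0 := by
    simp [leadAbs]
  have hinv1 : emInv [v0] v0 := by
    refine ⟨by simp, by intro u hu; simp at hu; subst hu; exact le_rfl, ?_⟩
    simp [firstToReach]
  have hinv : emInv (v0 :: rest) (leadAbs [v0] rest v0) := by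
    have := leadAbs_inv rest [v0] v0 hinv1
    simpa using this
  obtain ⟨hLmem, hLub, hLfirst⟩ := hinv
  -- B's value
  have hcounter : (v0 :: rest).foldl (fun d v => d.insert v (d.getD v 0 + 1)) PySem.Dict.empty
      = PySem.Dict.counter (v0 :: rest) :=
    PySem.Dict.foldl_insert_getD_add_one_eq_counter (v0 :: rest)
  have hvals : (PySem.Dict.counter (v0 :: rest)).values =
      (PySem.Set.ofList (v0 :: rest)).map (fun k => ((v0 :: rest).count k : Int)) := by
    show ((PySem.Dict.counter (v0 :: rest)).items.map Prod.snd) = _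
    rw [PySem.Dict.items_counter, List.map_map]
    rfl
  have hB : element_majoritaire_alt (v0 :: rest) = leadAbs [v0] rest v0 := by
    show emRescan
        ((PySem.List.max?
          ((v0 :: rest).foldl (fun d v => d.insert v (d.getD v 0 + 1)) PySem.Dict.empty).values
          (fun x => x)).getD 0)
        (v0 :: rest) PySem.Dict.empty ((PySem.List.pyGet? (v0 :: rest) 0).getD "") = _
    rw [hfb, hcounter, hvals,
      max_values_eq (v0 :: rest) (leadAbs [v0] rest v0) hLmem hLub]
    show emRescan (((v0 :: rest).count (leadAbs [v0] rest v0) : Nat) : Int)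
        (v0 :: rest) PySem.Dict.empty v0 = _
    rw [emRescan_eq ((v0 :: rest).count (leadAbs [v0] rest v0)) (v0 :: rest) []
        PySem.Dict.empty v0 hempty, hLfirst]
    rfl
  unfold Spec_element_majoritaire
  rw [hA, hstep1, hB]
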